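-- pv_equiv track=rewrite | github.com/bssrdf/pyleet | M/MonotonicQueue.py | rightFurthestGreaterOrEqual
-- ===== SOURCE A (Python) =====
-- import bisect
--
-- def rightFurthestGreaterOrEqual(nums):
--     n = len(nums)
--     indx = [-1]*n
--     stack, stackv = [], []
--     for i in range(n-1, -1, -1):
--         if not stack or nums[stack[-1]] < nums[i]:
--             stack.append(i)
--             stackv.append(nums[i])
--         else:
--             idx = bisect.bisect_left(stackv, nums[i])
--             indx[i] = stack[idx]
--     return indx
-- ===== SOURCE B (Python) =====
-- def rightFurthestGreaterOrEqual(nums):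
--     # simpler alternative: for each i, scan from the right end and stop at the
--     # first (hence furthest) j > i with nums[j] >= nums[i]
--     n = len(nums)
--     res = []
--     for i in range(n):
--         r = -1
--         for j in range(n - 1, i, -1):
--             if nums[j] >= nums[i]:
--                 r = j
--                 break
--         res.append(r)
--     return res
-- ===== Notes on version B (the rewrite author's own statement) =====
-- stated objective: simpler
-- what changed: Replaced A's right-to-left monotonic record stack with parallel value list and bisect lookup by a plain per-index right-to-left scan that stops at the first (hence furthest) j > i with nums[j] >= nums[i], with no auxiliary structures.
import Mathlib
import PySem

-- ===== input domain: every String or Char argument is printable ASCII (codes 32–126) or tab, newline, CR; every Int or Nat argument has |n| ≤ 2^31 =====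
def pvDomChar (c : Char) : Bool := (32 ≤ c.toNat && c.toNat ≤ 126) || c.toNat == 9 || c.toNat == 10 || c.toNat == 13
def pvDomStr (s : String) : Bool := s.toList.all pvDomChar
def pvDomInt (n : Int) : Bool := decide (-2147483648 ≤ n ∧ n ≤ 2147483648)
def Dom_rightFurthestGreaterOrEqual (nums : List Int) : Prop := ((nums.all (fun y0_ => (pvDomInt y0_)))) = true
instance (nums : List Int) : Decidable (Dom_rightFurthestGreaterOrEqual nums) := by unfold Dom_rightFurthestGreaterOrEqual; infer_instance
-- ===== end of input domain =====

-- B replaces A's right-to-left monotonic record stack + bisect with a plain nested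
-- right-to-left scan per index (simpler, no auxiliary structures; not faster).

-- ===== PORT A =====
-- A's loop 'for i in range(n-1, -1, -1)' with state (indx, stack, stackv); k+1 means i = k.
-- All list indices A uses are nonnegative and in range, so List.getD is exact there.
def goA (nums : List Int) (k : Nat) (indx : List Int) (stack : List Nat) (stackv : List Int) : List Int :=
  match k with
  | 0 => indx
  | k + 1 =>
    match stack.getLast? with
    | none =>        -- 'not stack'
      goA nums k indx (stack ++ [k]) (stackv ++ [nums.getD k 0])
    | some t =>
      if nums.getD t 0 < nums.getD k 0 then
        goA nums k indx (stack ++ [k]) (stackv ++ [nums.getD k 0])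
      else
        -- bisect.bisect_left is PySem.List.bisectLeft
        let idx := PySem.List.bisectLeft stackv (nums.getD k 0)
        goA nums k (indx.set k ((stack.getD idx 0 : Nat) : Int)) stack stackv

def rightFurthestGreaterOrEqual (nums : List Int) : List Int :=
  goA nums nums.length (List.replicate nums.length (-1)) [] []

-- ===== PORT B =====
-- B's inner loop 'for j in range(n-1, i, -1): if nums[j] >= v: r = j; break'
def scanJ (nums : List Int) (v : Int) (i : Nat) (j : Nat) : Int :=
  if _h : i < j then
    if nums.getD j 0 ≥ v then (j : Int) else scanJ nums v i (j - 1)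
  else (-1 : Int)
termination_by j
decreasing_by omega

def rightFurthestGreaterOrEqual_alt (nums : List Int) : List Int :=
  (List.range nums.length).map (fun i => scanJ nums (nums.getD i 0) i (nums.length - 1))

-- ===== PRECONDITION & SPEC =====
def Spec_rightFurthestGreaterOrEqual (nums : List Int) (out : List Int) : Prop := out = rightFurthestGreaterOrEqual_alt nums
instance (nums : List Int) (out : List Int) : Decidable (Spec_rightFurthestGreaterOrEqual nums out) := by unfold Spec_rightFurthestGreaterOrEqual; infer_instance

-- ===== CLAIM (what is proved, stated in full; the proofs are below) =====
def Claim_equal_rightFurthestGreaterOrEqual : Prop := ∀ (nums : List Int), Dom_rightFurthestGreaterOrEqual nums → Spec_rightFurthestGreaterOrEqual nums (rightFurthestGreaterOrEqual nums)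

-- ===== LEMMAS AND PROOFS =====

-- B's answer for index i, as a function (what the map in _alt computes pointwise)
def best (nums : List Int) (i : Nat) : Int :=
  scanJ nums (nums.getD i 0) i (nums.length - 1)

lemma scanJ_eq_neg_one (nums : List Int) (v : Int) (i : Nat) :
    ∀ j, (∀ t, i < t → t ≤ j → nums.getD t 0 < v) → scanJ nums v i j = -1 := by
  intro j
  induction j using Nat.strong_induction_on with
  | _ j ih =>
    intro h
    rw [scanJ]
    split
    · rename_i hij
      have : nums.getD j 0 < v := h j hij le_rfl
      rw [if_neg (by omega)]
      exact ih (j - 1) (by omega) (fun t ht1 ht2 => h t ht1 (by omega))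
    · rfl

lemma scanJ_eq_of (nums : List Int) (v : Int) (i m : Nat)
    (h1 : i < m) (h3 : v ≤ nums.getD m 0) :
    ∀ j, m ≤ j → (∀ t, m < t → t ≤ j → nums.getD t 0 < v) → scanJ nums v i j = (m : Int) := by
  intro j
  induction j using Nat.strong_induction_on with
  | _ j ih =>
    intro h2 h4
    rw [scanJ]
    rw [dif_pos (by omega)]
    by_cases hm : m = j
    · subst hm; rw [if_pos (by omega)]
    · have : nums.getD j 0 < v := h4 j (by omega) le_rfl
      rw [if_neg (by omega)]
      exact ih (j - 1) (by omega) (by omega) (fun t ht1 ht2 => h4 t ht1 (by omega))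

-- the loop invariant for A's stack, before processing index k-1 (indices k..n-1 done):
-- entries are in [k, n), strictly decreasing along the list, each is a right-to-left
-- record, and every processed position is dominated by some record at or after it.
def InvA (nums : List Int) (k : Nat) (stack : List Nat) : Prop :=
  (∀ e ∈ stack, k ≤ e ∧ e < nums.length) ∧
  stack.Pairwise (fun a b => b < a) ∧
  (∀ e ∈ stack, ∀ t, e < t → t < nums.length → nums.getD t 0 < nums.getD e 0) ∧
  (∀ t, k ≤ t → t < nums.length → ∃ e ∈ stack, t ≤ e ∧ nums.getD t 0 ≤ nums.getD e 0)

lemma stackv_sorted (nums : List Int) (k : Nat) (stack : List Nat) (h : InvA nums k stack) :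
    (stack.map (fun e => nums.getD e 0)).Pairwise (· ≤ ·) := by
  rw [List.pairwise_map]
  refine (h.2.1.imp_of_mem ?_)
  intro a b ha hb hlt
  exact le_of_lt (h.2.2.1 b hb a hlt (h.1 a ha).2)

lemma getLast_min (stack : List Nat) (hp : stack.Pairwise (fun a b => b < a)) (hne : stack ≠ []) :
    ∀ e ∈ stack, stack.getLast hne ≤ e := by
  induction stack with
  | nil => exact absurd rfl hne
  | cons x xs ih =>
    intro e he
    obtain ⟨h1, h2⟩ := List.pairwise_cons.mp hp
    cases xs with
    | nil => simp at he; simp [he]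
    | cons y ys =>
      rw [List.getLast_cons (by simp)]
      rcases List.mem_cons.mp he with rfl | he'
      · have := h1 _ (List.getLast_mem (l := y :: ys) (by simp))
        omega
      · exact ih h2 (by simp) e he'

-- in the push branch, no processed position reaches nums[k]
lemma push_no_hit (nums : List Int) (k : Nat) (stack : List Nat) (h : InvA nums k.succ stack)
    (htop : ∀ (hne : stack ≠ []), nums.getD (stack.getLast hne) 0 < nums.getD k 0) :
    ∀ t, k < t → t < nums.length → nums.getD t 0 < nums.getD k 0 := by
  intro t ht1 ht2
  obtain ⟨e, he, _hte, hve⟩ := h.2.2.2 t ht1 ht2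
  have hne : stack ≠ [] := by intro hnil; subst hnil; simp at he
  have hlast := getLast_min stack h.2.1 hne e he
  have : nums.getD e 0 ≤ nums.getD (stack.getLast hne) 0 := by
    rcases eq_or_lt_of_le hlast with heq | hlt
    · rw [heq]
    · exact le_of_lt (h.2.2.1 _ (List.getLast_mem hne) e hlt (h.1 e he).2)
  exact lt_of_le_of_lt (le_trans hve this) (htop hne)

lemma push_inv (nums : List Int) (k : Nat) (stack : List Nat) (h : InvA nums k.succ stack)
    (hk : k < nums.length)
    (hno : ∀ t, k < t → t < nums.length → nums.getD t 0 < nums.getD k 0) :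
    InvA nums k (stack ++ [k]) := by
  obtain ⟨hb, hp, hr, hc⟩ := h
  refine ⟨?_, ?_, ?_, ?_⟩
  · intro e he
    rcases List.mem_append.mp he with he' | he'
    · have := hb e he'; omega
    · simp at he'; omega
  · rw [List.pairwise_append]
    refine ⟨hp, by simp, ?_⟩
    intro a ha b hb'
    simp at hb'; subst hb'
    have := hb a ha; omega
  · intro e he
    rcases List.mem_append.mp he with he' | he'
    · exact hr e he'
    · simp at he'; subst he'; exact hno
  · intro t ht1 ht2
    by_cases hkt : k = t
    · exact ⟨k, by simp, by omega, by rw [hkt]⟩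
    · obtain ⟨e, he, h1, h2⟩ := hc t (by omega) ht2
      exact ⟨e, List.mem_append.mpr (Or.inl he), h1, h2⟩

lemma pos_lt_of_gt (stack : List Nat) (hp : stack.Pairwise (fun a b => b < a))
    (p q : Nat) (hq : q < stack.length) (hpq : p < stack.length)
    (hgt : stack[q] < stack[p]) : p < q := by
  by_contra hle
  rcases eq_or_lt_of_le (Nat.le_of_not_lt hle) with heq | hlt
  · subst heq; omega
  · have := List.pairwise_iff_getElem.mp hp q p hq hpq hlt
    omega

-- the bisect branch returns exactly B's answer and preserves the invariant
lemma bisect_step (nums : List Int) (k : Nat) (stack : List Nat) (h : InvA nums k.succ stack)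
    (hk : k < nums.length) (hne : stack ≠ [])
    (htop : ¬ nums.getD (stack.getLast hne) 0 < nums.getD k 0) :
    ∃ hidx : PySem.List.bisectLeft (stack.map (fun e => nums.getD e 0)) (nums.getD k 0) < stack.length,
      (stack[PySem.List.bisectLeft (stack.map (fun e => nums.getD e 0)) (nums.getD k 0)] : Int) = best nums k ∧
      InvA nums k stack := by
  obtain ⟨hle, hlo, hhi⟩ :=
    PySem.List.bisectLeft_spec (stack.map (fun e => nums.getD e 0)) (nums.getD k 0)
      (stackv_sorted nums k.succ stack h)
  have hlen : (stack.map (fun e => nums.getD e 0)).length = stack.length := List.length_map ..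
  have hpos : 0 < stack.length := by
    cases stack with
    | nil => exact absurd rfl hne
    | cons _ _ => simp
  have hidx : PySem.List.bisectLeft (stack.map (fun e => nums.getD e 0)) (nums.getD k 0) < stack.length := by
    by_contra hge
    have h1 := hlo (stack.length - 1) (by omega) (by omega)
    rw [List.getElem_map] at h1
    have htop' : ¬ nums.getD (stack[stack.length - 1]'(by omega)) 0 < nums.getD k 0 := by
      rw [← List.getLast_eq_getElem hne]; exact htop
    exact htop' h1
  refine ⟨hidx, ?_, ?_⟩
  · -- stack[idx] is B's answer at k
    have hmem : stack[PySem.List.bisectLeft (stack.map (fun e => nums.getD e 0)) (nums.getD k 0)] ∈ stack :=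
      List.getElem_mem hidx
    have hmb := h.1 _ hmem
    have hvm : nums.getD k 0 ≤ nums.getD (stack[PySem.List.bisectLeft (stack.map (fun e => nums.getD e 0)) (nums.getD k 0)]'hidx) 0 := by
      have := hhi (PySem.List.bisectLeft (stack.map (fun e => nums.getD e 0)) (nums.getD k 0)) (by omega) le_rfl
      rw [List.getElem_map] at this
      exact this
    have hafter : ∀ t, stack[PySem.List.bisectLeft (stack.map (fun e => nums.getD e 0)) (nums.getD k 0)]'hidx < t →
        t < nums.length → nums.getD t 0 < nums.getD k 0 := by
      intro t ht1 ht2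
      obtain ⟨e, he, hte, hve⟩ := h.2.2.2 t (by omega) ht2
      obtain ⟨p, hpl, hpe⟩ := List.getElem_of_mem he
      have hpq : p < PySem.List.bisectLeft (stack.map (fun e => nums.getD e 0)) (nums.getD k 0) :=
        pos_lt_of_gt stack h.2.1 p _ hidx hpl (by omega)
      have h2 := hlo p (by omega) hpq
      rw [List.getElem_map] at h2
      rw [hpe] at h2
      omega
    rw [best]
    symm
    apply scanJ_eq_of nums (nums.getD k 0) k _ (by omega) hvm (nums.length - 1) (by omega)
    intro t ht1 ht2
    exact hafter t ht1 (by omega)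
  · obtain ⟨hb, hp, hr, hc⟩ := h
    refine ⟨fun e he => ⟨by have := hb e he; omega, (hb e he).2⟩, hp, hr, ?_⟩
    intro t ht1 ht2
    by_cases hkt : k = t
    · subst hkt
      refine ⟨stack[PySem.List.bisectLeft (stack.map (fun e => nums.getD e 0)) (nums.getD k 0)]'hidx,
        List.getElem_mem hidx, ?_, ?_⟩
      · have := hb _ (List.getElem_mem hidx); omega
      · have := hhi (PySem.List.bisectLeft (stack.map (fun e => nums.getD e 0)) (nums.getD k 0)) (by omega) le_rfl
        rw [List.getElem_map] at this
        exact this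
    · obtain ⟨e, he, h1, h2⟩ := hc t (by omega) ht2
      exact ⟨e, he, h1, h2⟩

lemma indx_set (n k : Nat) (_hk : k < n) (f : Nat → Int) (val : Int) :
    ((List.range n).map f).set k val
      = (List.range n).map (fun t => if t = k then val else f t) := by
  apply List.ext_getElem
  · simp
  · intro i h1 h2
    simp only [List.getElem_set, List.getElem_map, List.getElem_range]
    split_ifs <;> first | rfl | omega

lemma indx_shift (nums : List Int) (k : Nat) (hbest : best nums k = -1) :
    ((List.range nums.length).map (fun t => if t < k + 1 then (-1 : Int) else best nums t))
      = (List.range nums.length).map (fun t => if t < k then (-1 : Int) else best nums t) := by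
  apply List.map_congr_left
  intro t _
  by_cases htk : t = k
  · subst htk; simp [hbest]
  · by_cases h1 : t < k <;> by_cases h2 : t < k + 1 <;> simp_all <;> omega

lemma goA_eq (nums : List Int) : ∀ (k : Nat) (stack : List Nat), k ≤ nums.length →
    InvA nums k stack →
    goA nums k ((List.range nums.length).map (fun t => if t < k then (-1 : Int) else best nums t))
      stack (stack.map (fun e => nums.getD e 0))
      = (List.range nums.length).map (best nums) := by
  intro k
  induction k with
  | zero =>
    intro stack _ _
    rw [goA]
    apply List.map_congr_left
    intro t _
    simp
  | succ k ih =>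
    intro stack hk hinv
    rw [goA]
    rcases hl : stack.getLast? with _ | t
    · -- empty stack: push
      have hnil : stack = [] := List.getLast?_eq_none_iff.mp hl
      subst hnil
      dsimp only
      have hno := push_no_hit nums k [] hinv (by intro hne; exact absurd rfl hne)
      have hbest : best nums k = -1 := by
        apply scanJ_eq_neg_one
        intro t ht1 ht2
        exact hno t ht1 (by omega)
      rw [indx_shift nums k hbest]
      have := ih ([] ++ [k]) (by omega) (push_inv nums k [] hinv (by omega) hno)
      simpa using this
    · have hne : stack ≠ [] := by
        intro hnil; subst hnil; simp at hl
      have htl : t = stack.getLast hne := by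
        rw [List.getLast?_eq_some_getLast hne] at hl
        exact (Option.some_inj.mp hl).symm
      dsimp only
      by_cases hcond : nums.getD t 0 < nums.getD k 0
      · rw [if_pos hcond]
        have hno := push_no_hit nums k stack hinv (by intro hne'; rw [← htl]; exact hcond)
        have hbest : best nums k = -1 := by
          apply scanJ_eq_neg_one
          intro t' ht1 ht2
          exact hno t' ht1 (by omega)
        rw [indx_shift nums k hbest]
        have := ih (stack ++ [k]) (by omega) (push_inv nums k stack hinv (by omega) hno)
        simpa using this
      · rw [if_neg hcond]
        subst htl
        obtain ⟨hidx, hval, hinv'⟩ := bisect_step nums k stack hinv (by omega) hne hcond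
        rw [List.getD_eq_getElem _ _ (by simpa using hidx)]
        rw [hval]
        rw [indx_set nums.length k (by omega) _ _]
        have heq : ((List.range nums.length).map
            (fun t => if t = k then best nums k
                      else if t < k + 1 then (-1 : Int) else best nums t))
            = (List.range nums.length).map (fun t => if t < k then (-1 : Int) else best nums t) := by
          apply List.map_congr_left
          intro t' _
          by_cases htk : t' = k
          · subst htk
            simp
          · rw [if_neg htk]
            by_cases h1 : t' < k <;> by_cases h2 : t' < k + 1 <;> simp_all <;> omega
        rw [heq]
        exact ih stack (by omega) hinv'

-- ===== VERDICT (by name: the statement is the Claim_ definition above) =====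
theorem rightFurthestGreaterOrEqual_spec : Claim_equal_rightFurthestGreaterOrEqual := by
  intro nums _dom
  unfold Spec_rightFurthestGreaterOrEqual rightFurthestGreaterOrEqual rightFurthestGreaterOrEqual_alt
  have hrep : List.replicate nums.length (-1 : Int)
      = (List.range nums.length).map (fun t => if t < nums.length then (-1 : Int) else best nums t) := by
    apply List.ext_getElem
    · simp
    · intro i h1 h2
      simp only [List.getElem_replicate, List.getElem_map, List.getElem_range]
      rw [if_pos (by simpa using h1)]
  rw [hrep]
  have hinv : InvA nums nums.length [] := by
    refine ⟨by simp, by simp, by simp, ?_⟩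
    intro t ht1 ht2; omega
  have := goA_eq nums nums.length [] le_rfl hinv
  simpa [best] using this
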